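-- pv_equiv track=rewrite | github.com/itsf4llofstars/audible_chess | src/pgn_parsers.py | scrub_annotations
-- ===== SOURCE A (Python) =====
-- def scrub_annotations(games):
--     """Needs Doc. Has test"""
--     annotations = ["!", "?", "+"]
--     index = 0
--     while index < len(games):
--         for annotate in annotations:
--             games[index] = games[index].replace(annotate, "")
--         index += 1
--     return games
-- ===== SOURCE B (Python) =====
-- def scrub_annotations(games):
--     """Needs Doc. Has test"""
--     annots = {"!", "?", "+"}
--     for i in range(len(games)):
--         games[i] = ''.join(c for c in games[i] if c not in annots)
--     return games
-- ===== Notes on version B (the rewrite author's own statement) =====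
-- stated objective: simpler
-- what changed: Replaces the per-element sequence of three .replace scans with a single character-by-character filter against a set of annotation characters, still mutating the list in place.
import Mathlib
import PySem

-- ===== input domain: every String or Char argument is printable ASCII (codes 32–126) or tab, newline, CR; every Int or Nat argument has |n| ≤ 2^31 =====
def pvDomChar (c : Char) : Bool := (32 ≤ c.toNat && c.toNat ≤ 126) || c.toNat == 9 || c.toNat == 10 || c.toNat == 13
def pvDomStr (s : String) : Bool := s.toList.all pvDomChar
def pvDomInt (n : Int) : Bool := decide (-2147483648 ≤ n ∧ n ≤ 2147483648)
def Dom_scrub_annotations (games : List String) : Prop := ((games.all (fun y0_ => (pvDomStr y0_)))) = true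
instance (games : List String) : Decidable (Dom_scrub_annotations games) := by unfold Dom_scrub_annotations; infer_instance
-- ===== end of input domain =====

-- B removes the three annotation chars with one per-character filter pass instead of three
-- sequential .replace scans (simpler); both mutate the caller's list in place in Python —
-- the equivalence proved here is about the RETURN value.


-- ===== PORT A =====
-- while loop over indices, each element rewritten by the for-loop of three replaces
def scrub_annotations (games : List String) : List String :=
  games.map (fun g =>
    (["!", "?", "+"]).foldl (fun g annotate => PySem.Str.replace g annotate "") g)

-- ===== PORT B =====
-- set of annotation chars; each element replaced by ''.join of its filtered characters
def scrub_annotations_alt (games : List String) : List String :=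
  let annots : PySem.Set Char := PySem.Set.ofList ['!', '?', '+']
  games.map (fun g => String.ofList (g.toList.filter (fun c => !(PySem.Set.contains annots c))))

-- ===== PRECONDITION & SPEC =====
def Spec_scrub_annotations (games : List String) (out : List String) : Prop := out = scrub_annotations_alt games
instance (games : List String) (out : List String) : Decidable (Spec_scrub_annotations games out) := by unfold Spec_scrub_annotations; infer_instance

-- ===== CLAIM (what is proved, stated in full; the proofs are below) =====
def Claim_equal_scrub_annotations : Prop := ∀ (games : List String), Dom_scrub_annotations games → Spec_scrub_annotations games (scrub_annotations games)

-- ===== LEMMAS AND PROOFS =====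

-- Chars.replace.go with a single-char pattern and empty replacement is a filter
theorem replace_go_single (a : Char) :
    ∀ (l acc : List Char) (fuel : Nat), l.length ≤ fuel →
      PySem.Chars.replace.go [a] [] fuel l acc
        = acc.reverse ++ l.filter (fun c => !(c == a)) := by
  intro l
  induction l with
  | nil =>
      intro acc fuel _
      cases fuel <;> simp [PySem.Chars.replace.go]
  | cons c t ih =>
      intro acc fuel hf
      cases fuel with
      | zero => simp at hf
      | succ fuel =>
        simp only [List.length_cons, Nat.succ_le_succ_iff] at hf
        by_cases h : c = a
        · subst h
          simp [PySem.Chars.replace.go, List.isPrefixOf, ih acc fuel hf]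
        · have hp : List.isPrefixOf [a] (c :: t) = false := by
            simp [List.isPrefixOf, BEq.beq]
            exact fun hh => (h hh.symm).elim
          simp [PySem.Chars.replace.go, hp, ih (c :: acc) fuel hf, h]

-- replacing a single character by "" filters it out
theorem replace_single (a : Char) (l : List Char) :
    PySem.Chars.replace l [a] [] = l.filter (fun c => !(c == a)) := by
  simp [PySem.Chars.replace, replace_go_single a l [] l.length le_rfl]

theorem scrub_annotations_spec : Claim_equal_scrub_annotations := by
  intro games _
  unfold Spec_scrub_annotations scrub_annotations scrub_annotations_alt
  simp only [List.foldl_cons, List.foldl_nil]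
  apply List.map_congr_left
  intro g _
  have h : (PySem.Str.replace (PySem.Str.replace (PySem.Str.replace g "!" "") "?" "") "+" "").toList
      = g.toList.filter (fun c => !(PySem.Set.contains (PySem.Set.ofList ['!', '?', '+']) c)) := by
    simp only [PySem.Str.toList_replace]
    have h1 : ("!" : String).toList = ['!'] := rfl
    have h2 : ("?" : String).toList = ['?'] := rfl
    have h3 : ("+" : String).toList = ['+'] := rfl
    have h0 : ("" : String).toList = [] := rfl
    rw [h1, h2, h3, h0, replace_single, replace_single, replace_single,
        List.filter_filter, List.filter_filter]
    apply List.filter_congr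
    intro c _
    by_cases hc1 : c = '!' <;> by_cases hc2 : c = '?' <;> by_cases hc3 : c = '+' <;>
      simp_all [PySem.Set.ofList, PySem.Set.add, PySem.Set.contains]
  exact String.toList_inj.mp (by simpa using h)
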